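-- pv_equiv track=rewrite | github.com/abhinav-gautam/leetcode | Topicwise/Hashmap/3741. Minimum Distance Between Three Equal Elements II.py | minimumDistance
-- ===== SOURCE A (Python) =====
-- from typing import List
--
-- def minimumDistance(nums: List[int]) -> int:
--     indexMap = {}
--     minDistance = float("inf")
--
--     for i, x in enumerate(nums):
--         indexMap.setdefault(x, []).append(i)
--
--     for indices in indexMap.values():
--         if len(indices) >= 3:
--             for i in range(len(indices) - 2):
--                 distance = (
--                     abs(indices[i] - indices[i + 1])
--                     + abs(indices[i + 1] - indices[i + 2])
--                     + abs(indices[i + 2] - indices[i])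
--                 )
--                 minDistance = min(minDistance, distance)
--
--     if minDistance == float("inf"):
--         return -1
--
--     return minDistance
-- ===== SOURCE B (Python) =====
-- from typing import List
--
-- def minimumDistance(nums: List[int]) -> int:
--     # One pass: for each value keep only its last two seen indices.
--     last = {}          # value -> (second_last_index_or_None, last_index)
--     best = None
--     for i, x in enumerate(nums):
--         pair = last.get(x)
--         if pair is None:
--             last[x] = (None, i)
--         else:
--             p2, p1 = pair
--             if p2 is not None:
--                 d = abs(p2 - p1) + abs(p1 - i) + abs(i - p2)
--                 best = d if best is None else min(best, d)
--             last[x] = (p1, i)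
--     return -1 if best is None else best
-- ===== Notes on version B (the rewrite author's own statement) =====
-- stated objective: simpler
-- what changed: Replaces A's two-phase algorithm (build a dict of every value's full index list, then rescan each list for consecutive triples) by a single pass that keeps only each value's last two seen indices and updates the minimum on the fly.
import Mathlib
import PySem

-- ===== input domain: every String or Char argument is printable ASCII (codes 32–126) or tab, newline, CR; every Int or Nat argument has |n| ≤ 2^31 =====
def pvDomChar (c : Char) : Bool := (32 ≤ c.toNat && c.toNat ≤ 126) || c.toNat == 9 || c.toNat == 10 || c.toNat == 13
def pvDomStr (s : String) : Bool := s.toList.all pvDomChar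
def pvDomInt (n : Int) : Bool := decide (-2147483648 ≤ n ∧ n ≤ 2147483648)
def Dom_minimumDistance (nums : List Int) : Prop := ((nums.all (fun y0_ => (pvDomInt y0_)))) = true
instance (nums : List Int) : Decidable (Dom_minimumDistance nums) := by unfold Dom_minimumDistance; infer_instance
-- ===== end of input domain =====

-- B replaces A's two-phase dict-of-all-indices build + per-value triple scan by a single pass
-- that keeps only each value's last two indices (objective: simpler, one loop, O(1) state per value).

-- ===== PORT A =====
-- float('inf') with min(...) is represented by Option Int: none = inf.
def pvMinOpt (a : Option Int) (d : Int) : Option Int :=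
  some (match a with | none => d | some v => min v d)

-- body of A's second phase for one value's index list (the 'if len >= 3' guard and inner range loop);
-- pyGetD is exact here: every accessed index is in range, Python's indices[...] never raises.
def pvScanTriples (acc : Option Int) (indices : List Int) : Option Int :=
  if 3 ≤ indices.length then
    (PySem.List.pyRange 0 ((indices.length : Int) - 2)).foldl
      (fun acc i =>
        pvMinOpt acc
          (|PySem.List.pyGetD indices i 0 - PySem.List.pyGetD indices (i + 1) 0| +
           |PySem.List.pyGetD indices (i + 1) 0 - PySem.List.pyGetD indices (i + 2) 0| +
           |PySem.List.pyGetD indices (i + 2) 0 - PySem.List.pyGetD indices i 0|)) acc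
  else acc

def minimumDistance (nums : List Int) : Int :=
  -- indexMap.setdefault(x, []).append(i)  ==  indexMap[x] = indexMap.get(x, []) + [i]
  let indexMap := (PySem.List.enumerate nums).foldl
      (fun d p => d.modify p.2 [] (fun l => l ++ [p.1]))
      (PySem.Dict.empty : PySem.Dict Int (List Int))
  match indexMap.values.foldl pvScanTriples none with
  | none => -1
  | some v => v

-- ===== PORT B =====
def pvStepB (st : PySem.Dict Int (Option Int × Int) × Option Int) (p : Int × Int) :
    PySem.Dict Int (Option Int × Int) × Option Int :=
  match st.1.get? p.2 with
  | none => (st.1.insert p.2 (none, p.1), st.2)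
  | some (p2, p1) =>
      match p2 with
      | none => (st.1.insert p.2 (some p1, p.1), st.2)
      | some j =>
          let d := |j - p1| + |p1 - p.1| + |p.1 - j|
          (st.1.insert p.2 (some p1, p.1),
           some (match st.2 with | none => d | some b => min b d))

def minimumDistance_alt (nums : List Int) : Int :=
  let st := (PySem.List.enumerate nums).foldl pvStepB
      ((PySem.Dict.empty : PySem.Dict Int (Option Int × Int)), none)
  match st.2 with
  | none => -1
  | some b => b

-- ===== PRECONDITION & SPEC =====
def Spec_minimumDistance (nums : List Int) (out : Int) : Prop := out = minimumDistance_alt nums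
instance (nums : List Int) (out : Int) : Decidable (Spec_minimumDistance nums out) := by unfold Spec_minimumDistance; infer_instance

-- ===== CLAIM (what is proved, stated in full; the proofs are below) =====
def Claim_equal_minimumDistance : Prop := ∀ (nums : List Int), Dom_minimumDistance nums → Spec_minimumDistance nums (minimumDistance nums)

-- ===== LEMMAS AND PROOFS =====

-- indices (as Ints) at which x occurs in nums
def pvOcc (x : Int) (nums : List Int) : List Int :=
  ((PySem.List.enumerate nums).filter (fun p => p.2 == x)).map (fun p => p.1)

-- the last two occurrences, B-state style: none / some (none, last) / some (some secondLast, last)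
def pvLastTwo (l : List Int) : Option (Option Int × Int) :=
  match l.reverse with
  | [] => none
  | [a] => some (none, a)
  | a :: b :: _ => some (some b, a)

def pvBuild (nums : List Int) : PySem.Dict Int (List Int) :=
  (PySem.List.enumerate nums).foldl
    (fun d p => d.modify p.2 [] (fun l => l ++ [p.1]))
    (PySem.Dict.empty : PySem.Dict Int (List Int))

def pvM (nums : List Int) : Option Int := (pvBuild nums).values.foldl pvScanTriples none

def pvNewBest (best : Option Int) (lt : Option (Option Int × Int)) (n : Int) : Option Int :=
  match lt with
  | some (some j, p1) => pvMinOpt best (|j - p1| + |p1 - n| + |n - j|)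
  | _ => best

lemma pvMinOpt_comm (a : Option Int) (d e : Int) :
    pvMinOpt (pvMinOpt a d) e = pvMinOpt (pvMinOpt a e) d := by
  cases a <;> simp [pvMinOpt, min_comm d e, min_right_comm]

lemma foldl_pvMinOpt_push (L : List Int) (f : Int → Int) (acc : Option Int) (d : Int) :
    L.foldl (fun a i => pvMinOpt a (f i)) (pvMinOpt acc d)
      = pvMinOpt (L.foldl (fun a i => pvMinOpt a (f i)) acc) d := by
  induction L generalizing acc with
  | nil => rfl
  | cons i L ih => simp only [List.foldl_cons]; rw [pvMinOpt_comm, ih]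

lemma pvScan_push (acc : Option Int) (d : Int) (l : List Int) :
    pvScanTriples (pvMinOpt acc d) l = pvMinOpt (pvScanTriples acc l) d := by
  unfold pvScanTriples
  split
  · exact foldl_pvMinOpt_push _ _ acc d
  · rfl

lemma foldl_scan_push (V : List (List Int)) (acc : Option Int) (d : Int) :
    V.foldl pvScanTriples (pvMinOpt acc d) = pvMinOpt (V.foldl pvScanTriples acc) d := by
  induction V generalizing acc with
  | nil => rfl
  | cons l V ih => simp only [List.foldl_cons, pvScan_push, ih]

lemma pvGetD_append_lt (l : List Int) (n : Int) {i : Int} (h0 : 0 ≤ i) (h1 : i < (l.length : Int)) :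
    PySem.List.pyGetD (l ++ [n]) i 0 = PySem.List.pyGetD l i 0 := by
  rw [PySem.List.pyGetD_eq_getElem _ 0 h0 (by simp; omega),
      PySem.List.pyGetD_eq_getElem _ 0 h0 h1]
  exact List.getElem_append_left (by omega)
lemma pvGetD_append_last (l : List Int) (n : Int) :
    PySem.List.pyGetD (l ++ [n]) (l.length : Int) 0 = n := by
  rw [PySem.List.pyGetD_eq_getElem _ 0 (by positivity) (by simp)]
  simp
lemma pvScan_snoc (acc : Option Int) (lv : List Int) (n : Int) :
    pvScanTriples acc (lv ++ [n]) = pvNewBest (pvScanTriples acc lv) (pvLastTwo lv) n := by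
  rcases h : lv.reverse with _ | ⟨p1, t1⟩
  · have hl : lv = [] := by simpa using congrArg List.reverse h
    subst hl
    simp [pvScanTriples, pvLastTwo, pvNewBest]
  rcases t1 with _ | ⟨j, t⟩
  · have hl : lv = [p1] := by simpa using congrArg List.reverse h
    subst hl
    simp [pvScanTriples, pvLastTwo, pvNewBest]
  -- main case: lv ends in j, p1
  have hlt : pvLastTwo lv = some (some j, p1) := by simp [pvLastTwo, h]
  obtain ⟨u, rfl⟩ : ∃ u, lv = u ++ [j, p1] :=
    ⟨t.reverse, by simpa using congrArg List.reverse h⟩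
  rw [hlt]
  simp only [pvNewBest]
  have hb : (((u ++ [j, p1]).length : Int)) - 2 = (u.length : Int) := by
    simp
  have hR : pvScanTriples acc (u ++ [j, p1])
      = (PySem.List.pyRange 0 (u.length : Int)).foldl
        (fun acc i =>
          pvMinOpt acc
            (|PySem.List.pyGetD (u ++ [j, p1]) i 0 - PySem.List.pyGetD (u ++ [j, p1]) (i + 1) 0| +
             |PySem.List.pyGetD (u ++ [j, p1]) (i + 1) 0 - PySem.List.pyGetD (u ++ [j, p1]) (i + 2) 0| +
             |PySem.List.pyGetD (u ++ [j, p1]) (i + 2) 0 - PySem.List.pyGetD (u ++ [j, p1]) i 0|)) acc := by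
    unfold pvScanTriples
    rw [hb]
    split
    · rfl
    · have h2 : u.length = 0 := by simp at *; omega
      rw [h2]
      have h0 : PySem.List.pyRange 0 ((0 : Nat) : Int) = [] := by decide
      rw [h0]
      rfl
  have hb2 : ((((u ++ [j, p1]) ++ [n]).length : Int)) - 2 = (u.length : Int) + 1 := by
    simp; ring
  have hguard : 3 ≤ ((u ++ [j, p1]) ++ [n]).length := by simp
  conv_lhs => rw [pvScanTriples]
  rw [if_pos hguard, hb2,
      PySem.List.pyRange_one_succ_right (by positivity : (0:Int) ≤ (u.length : Int)),
      List.foldl_append]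
  have hpre : ∀ (a : Option Int), ∀ i ∈ PySem.List.pyRange 0 (u.length : Int),
      (fun acc i =>
        pvMinOpt acc
          (|PySem.List.pyGetD ((u ++ [j, p1]) ++ [n]) i 0 - PySem.List.pyGetD ((u ++ [j, p1]) ++ [n]) (i + 1) 0| +
           |PySem.List.pyGetD ((u ++ [j, p1]) ++ [n]) (i + 1) 0 - PySem.List.pyGetD ((u ++ [j, p1]) ++ [n]) (i + 2) 0| +
           |PySem.List.pyGetD ((u ++ [j, p1]) ++ [n]) (i + 2) 0 - PySem.List.pyGetD ((u ++ [j, p1]) ++ [n]) i 0|)) a i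
      = (fun acc i =>
        pvMinOpt acc
          (|PySem.List.pyGetD (u ++ [j, p1]) i 0 - PySem.List.pyGetD (u ++ [j, p1]) (i + 1) 0| +
           |PySem.List.pyGetD (u ++ [j, p1]) (i + 1) 0 - PySem.List.pyGetD (u ++ [j, p1]) (i + 2) 0| +
           |PySem.List.pyGetD (u ++ [j, p1]) (i + 2) 0 - PySem.List.pyGetD (u ++ [j, p1]) i 0|)) a i := by
    intro a i hi
    rw [PySem.List.mem_pyRange_one] at hi
    simp only
    rw [pvGetD_append_lt _ n hi.1 (by simp; omega),
        pvGetD_append_lt _ n (by omega) (by simp; omega),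
        pvGetD_append_lt _ n (by omega) (by simp; omega)]
  rw [PySem.List.foldl_congr_mem _ _ _ acc hpre, ← hR]
  have e1 : PySem.List.pyGetD ((u ++ [j, p1]) ++ [n]) (u.length : Int) 0 = j := by
    rw [pvGetD_append_lt _ n (by positivity) (by simp),
        PySem.List.pyGetD_eq_getElem _ 0 (by positivity) (by simp)]
    simp
  have e2 : PySem.List.pyGetD ((u ++ [j, p1]) ++ [n]) ((u.length : Int) + 1) 0 = p1 := by
    have hc : (u.length : Int) + 1 = (((u.length + 1 : Nat)) : Int) := by push_cast; ring
    rw [hc, pvGetD_append_lt _ n (by positivity) (by simp),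
        PySem.List.pyGetD_eq_getElem _ 0 (by positivity) (by simp)]
    simp
  have e3 : PySem.List.pyGetD ((u ++ [j, p1]) ++ [n]) ((u.length : Int) + 2) 0 = n := by
    have h2 : (u.length : Int) + 2 = (((u ++ [j, p1]).length : Nat) : Int) := by simp
    rw [h2]
    exact pvGetD_append_last _ n
  simp only [List.foldl_cons, List.foldl_nil]
  rw [e1, e2, e3]
lemma pvFold_map_replace (x n : Int) (its : List (Int × List Int)) :
    ∀ (acc : Option Int) (lv : List Int),
      (its.map Prod.fst).Nodup → (x, lv) ∈ its →
      ((its.map (fun p => if (p.1 == x) = true then (x, lv ++ [n]) else p)).map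
          (fun q => q.2)).foldl pvScanTriples acc
        = pvNewBest ((its.map (fun q => q.2)).foldl pvScanTriples acc) (pvLastTwo lv) n := by
  induction its with
  | nil => intro acc lv _ hmem; simp at hmem
  | cons p its ih =>
    intro acc lv hnd hmem
    simp only [List.map_cons, List.nodup_cons] at hnd
    by_cases hp : p.1 = x
    · have hpl : p = (x, lv) := by
        rcases List.mem_cons.mp hmem with h1 | h2
        · exact h1.symm
        · exact absurd (List.mem_map.mpr ⟨(x, lv), h2, by rw [hp]⟩) hnd.1
      subst hpl
      have htail : its.map (fun q => if (q.1 == x) = true then (x, lv ++ [n]) else q) = its := by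
        apply List.map_congr_left ?_ |>.trans (List.map_id its)
        intro q hq
        have hqx : q.1 ≠ x := fun hh => hnd.1 (List.mem_map.mpr ⟨q, hq, hh⟩)
        simp [hqx]
      simp only [List.map_cons, List.foldl_cons, beq_self_eq_true, if_pos, htail]
      rw [pvScan_snoc]
      rcases hlt : pvLastTwo lv with _ | ⟨p2, p1⟩
      · simp [pvNewBest]
      rcases p2 with _ | j
      · simp [pvNewBest]
      · simp only [pvNewBest]
        exact foldl_scan_push _ _ _
    · have hmem' : (x, lv) ∈ its := by
        rcases List.mem_cons.mp hmem with h1 | h2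
        · exact absurd (by rw [← h1]) hp
        · exact h2
      have hif : (if (p.1 == x) = true then (x, lv ++ [n]) else p) = p := by simp [hp]
      simp only [List.map_cons, List.foldl_cons, hif]
      exact ih (pvScanTriples acc p.2) lv hnd.2 hmem'

lemma pvBuild_getD (nums : List Int) (x : Int) :
    (pvBuild nums).getD x [] = pvOcc x nums := by
  unfold pvBuild pvOcc
  have h : (PySem.List.enumerate nums).foldl
      (fun d p => d.modify p.2 [] (fun l => l ++ [p.1]))
      (PySem.Dict.empty : PySem.Dict Int (List Int))
    = ((PySem.List.enumerate nums).map (fun p => (p.2, p.1))).foldl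
      (fun d p => d.modify p.1 [] (fun l => l ++ [p.2]))
      (PySem.Dict.empty : PySem.Dict Int (List Int)) := by
    rw [List.foldl_map]
  rw [h, PySem.Dict.getD_foldl_modify_append]
  simp [List.filter_map, List.map_map, Function.comp_def]
lemma pvBuild_keys_nodup (nums : List Int) : (pvBuild nums).keys.Nodup := by
  unfold pvBuild
  exact PySem.Dict.nodup_keys_foldl_modify_key (PySem.List.enumerate nums)
    (fun p => p.2) [] (fun (_ : PySem.Dict Int (List Int)) (p : Int × Int) (l : List Int) => l ++ [p.1])
    PySem.Dict.empty (by simp)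
lemma pvBuild_contains (nums : List Int) (x : Int) :
    (pvBuild nums).contains x = true ↔ pvOcc x nums ≠ [] := by
  rw [PySem.Dict.contains_iff_mem_keys]
  unfold pvBuild
  have h2 : (List.foldl (fun d p => d.modify p.2 [] fun l => l ++ [p.1])
      (PySem.Dict.empty : PySem.Dict Int (List Int)) (PySem.List.enumerate nums)).keys
      = PySem.Set.update (PySem.Dict.empty : PySem.Dict Int (List Int)).keys
          ((PySem.List.enumerate nums).map (fun p => p.2)) :=
    PySem.Dict.keys_foldl_modify_key (PySem.List.enumerate nums)
      (fun p => p.2) [] (fun (_ : PySem.Dict Int (List Int)) (p : Int × Int) (l : List Int) => l ++ [p.1])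
      PySem.Dict.empty
  rw [h2, show (PySem.Dict.empty : PySem.Dict Int (List Int)).keys = [] from rfl,
      PySem.Set.update_nil_left, PySem.Set.mem_ofList]
  unfold pvOcc
  simp only [ne_eq, List.map_eq_nil_iff, List.filter_eq_nil_iff, List.mem_map]
  push Not
  constructor
  · rintro ⟨p, hp, rfl⟩; exact ⟨p, hp, by simp⟩
  · rintro ⟨p, hp, h⟩; exact ⟨p, hp, by simpa using h⟩
lemma pvM_snoc (nums : List Int) (x : Int) :
    pvM (nums ++ [x]) = pvNewBest (pvM nums) (pvLastTwo (pvOcc x nums)) (nums.length : Int) := by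
  have h1 : PySem.List.enumerate [x] (0 + (nums.length : Int)) = [((nums.length : Int), x)] := by
    simp [PySem.List.enumerate]
  have hb : pvBuild (nums ++ [x])
      = (pvBuild nums).insert x (pvOcc x nums ++ [(nums.length : Int)]) := by
    show (PySem.List.enumerate (nums ++ [x])).foldl
        (fun d p => d.modify p.2 [] (fun l => l ++ [p.1]))
        (PySem.Dict.empty : PySem.Dict Int (List Int)) = _
    rw [PySem.List.enumerate_append, List.foldl_append, h1]
    simp only [List.foldl_cons, List.foldl_nil]
    show ((pvBuild nums).modify x [] (fun l => l ++ [(nums.length : Int)])) = _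
    show ((pvBuild nums).insert x ((pvBuild nums).getD x [] ++ [(nums.length : Int)])) = _
    rw [pvBuild_getD]
  unfold pvM
  rw [hb]
  by_cases hc : (pvBuild nums).contains x = true
  · -- x already a key: its list gets one more index
    have hget : (pvBuild nums).get? x = some (pvOcc x nums) := by
      rcases ho : (pvBuild nums).get? x with _ | v
      · rw [PySem.Dict.contains_eq_isSome_get?, ho] at hc; simp at hc
      · rw [← pvBuild_getD nums x, PySem.Dict.getD_eq_get?_getD, ho]; rfl
    have hmem : (x, pvOcc x nums) ∈ (pvBuild nums).items :=
      PySem.Dict.mem_items_of_get?_eq_some _ hget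
    have hnd : ((pvBuild nums).items.map Prod.fst).Nodup := pvBuild_keys_nodup nums
    have hit := PySem.Dict.items_insert_of_contains (pvBuild nums)
      (pvOcc x nums ++ [(nums.length : Int)]) hc
    show (((pvBuild nums).insert x (pvOcc x nums ++ [(nums.length : Int)])).items.map
        (fun q => q.2)).foldl pvScanTriples none = _
    rw [hit]
    exact pvFold_map_replace x (nums.length : Int) (pvBuild nums).items none (pvOcc x nums) hnd hmem
  · -- new key appended at the end; its singleton list contributes nothing
    have hc' : (pvBuild nums).contains x = false := by
      cases hcc : (pvBuild nums).contains x
      · rfl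
      · exact absurd hcc hc
    have hocc : pvOcc x nums = [] := by
      by_contra hne
      exact hc ((pvBuild_contains nums x).mpr hne)
    have hit := PySem.Dict.items_insert_of_not_contains (pvBuild nums)
      (pvOcc x nums ++ [(nums.length : Int)]) hc'
    show (((pvBuild nums).insert x (pvOcc x nums ++ [(nums.length : Int)])).items.map
        (fun q => q.2)).foldl pvScanTriples none = _
    rw [hit, List.map_append, List.foldl_append, hocc]
    simp only [List.map_cons, List.map_nil, List.foldl_cons, List.foldl_nil]
    have hs : ∀ a : Option Int, pvScanTriples a ([] ++ [(nums.length : Int)]) = a := by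
      intro a; simp [pvScanTriples]
    rw [hs]
    simp only [pvNewBest, pvLastTwo]
    rfl

lemma pvOcc_snoc (y x : Int) (nums : List Int) :
    pvOcc y (nums ++ [x]) = pvOcc y nums ++ (if x = y then [(nums.length : Int)] else []) := by
  unfold pvOcc
  rw [PySem.List.enumerate_append]
  have h1 : PySem.List.enumerate [x] (0 + (nums.length : Int)) = [((nums.length : Int), x)] := by
    simp [PySem.List.enumerate]
  rw [h1, List.filter_append, List.map_append]
  congr 1
  by_cases hx : x = y <;> simp [hx]
lemma pvLastTwo_snoc (l : List Int) (n : Int) :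
    pvLastTwo (l ++ [n]) = some (Option.map (fun q => q.2) (pvLastTwo l), n) := by
  rcases h : l.reverse with _ | ⟨a, t⟩
  · simp [pvLastTwo, h]
  · rcases t with _ | ⟨b, t⟩ <;> simp [pvLastTwo, h]
lemma pvB_inv (nums : List Int) :
    ((PySem.List.enumerate nums).foldl pvStepB
        ((PySem.Dict.empty : PySem.Dict Int (Option Int × Int)), none)).2 = pvM nums ∧
    ∀ y, ((PySem.List.enumerate nums).foldl pvStepB
        ((PySem.Dict.empty : PySem.Dict Int (Option Int × Int)), none)).1.get? y
          = pvLastTwo (pvOcc y nums) := by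
  induction nums using List.reverseRecOn with
  | nil => exact ⟨rfl, fun y => rfl⟩
  | append_singleton nums x ih =>
    obtain ⟨ih1, ih2⟩ := ih
    have h1 : PySem.List.enumerate [x] (0 + (nums.length : Int)) = [((nums.length : Int), x)] := by
      simp [PySem.List.enumerate]
    have hF : (PySem.List.enumerate (nums ++ [x])).foldl pvStepB
        ((PySem.Dict.empty : PySem.Dict Int (Option Int × Int)), none)
        = pvStepB ((PySem.List.enumerate nums).foldl pvStepB
            ((PySem.Dict.empty : PySem.Dict Int (Option Int × Int)), none))
            ((nums.length : Int), x) := by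
      rw [PySem.List.enumerate_append, List.foldl_append, h1]
      rfl
    rw [hF, pvM_snoc]
    rcases hlt : pvLastTwo (pvOcc x nums) with _ | ⟨p2, p1⟩
    · constructor
      · simp only [pvStepB, ih2 x, hlt, ih1, pvNewBest]
      · intro y
        simp only [pvStepB, ih2 x, hlt]
        rw [PySem.Dict.get?_insert]
        by_cases hy : y = x
        · subst hy
          rw [if_pos rfl, pvOcc_snoc y y nums, if_pos rfl, pvLastTwo_snoc, hlt]
          rfl
        · rw [if_neg hy, ih2 y, pvOcc_snoc y x nums, if_neg (fun hh => hy hh.symm),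
              List.append_nil]
    · rcases p2 with _ | j
      · constructor
        · simp only [pvStepB, ih2 x, hlt, ih1, pvNewBest]
        · intro y
          simp only [pvStepB, ih2 x, hlt]
          rw [PySem.Dict.get?_insert]
          by_cases hy : y = x
          · subst hy
            rw [if_pos rfl, pvOcc_snoc y y nums, if_pos rfl, pvLastTwo_snoc, hlt]
            rfl
          · rw [if_neg hy, ih2 y, pvOcc_snoc y x nums, if_neg (fun hh => hy hh.symm),
                List.append_nil]
      · constructor
        · simp only [pvStepB, ih2 x, hlt, ih1, pvNewBest, pvMinOpt]
        · intro y
          simp only [pvStepB, ih2 x, hlt]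
          rw [PySem.Dict.get?_insert]
          by_cases hy : y = x
          · subst hy
            rw [if_pos rfl, pvOcc_snoc y y nums, if_pos rfl, pvLastTwo_snoc, hlt]
            rfl
          · rw [if_neg hy, ih2 y, pvOcc_snoc y x nums, if_neg (fun hh => hy hh.symm),
                List.append_nil]

-- ===== VERDICT (by name: the statement is the Claim_ definition above) =====
theorem minimumDistance_spec : Claim_equal_minimumDistance := by
  intro nums _
  unfold Spec_minimumDistance
  have hA : minimumDistance nums = match pvM nums with | none => -1 | some v => v := rfl
  have hB : minimumDistance_alt nums =
      match ((PySem.List.enumerate nums).foldl pvStepB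
        ((PySem.Dict.empty : PySem.Dict Int (Option Int × Int)), none)).2 with
      | none => -1 | some b => b := rfl
  rw [hA, hB, (pvB_inv nums).1]
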